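-- pv_equiv track=rewrite | github.com/hsal-o/advent-of-code-2023 | day13/part1.py | find_reflection_index
-- ===== SOURCE A (Python) =====
-- def find_reflection_index(list):
--     for i in range(0, len(list) - 1):
--         left = i
--         right = i + 1
--
--         found_reflection = True
--         while(left >= 0 and right < len(list)):
--             if(list[left] == list[right]):
--                 # Both match
--                 left -= 1
--                 right += 1
--             else:
--                 found_reflection = False
--                 break
--
--         if(found_reflection):
--             return i
--
--     return -1
-- ===== SOURCE B (Python) =====
-- def find_reflection_index(list):
--     n = len(list)
--     # A reflection line reaching the left edge is an even palindromic prefix of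
--     # length 2*half (mirror index half-1); one reaching the right edge is an even
--     # palindromic suffix of length 2*half (mirror index n-1-half).  Prefix-type
--     # mirror indices are all smaller than suffix-type ones, so scan growing
--     # prefixes first, then shrinking suffixes; a block can only be a palindrome
--     # if the two rows at its seam match, so test the seam before the block.
--     for half in range(1, n // 2 + 1):
--         if list[half - 1] == list[half]:
--             block = list[:2 * half]
--             if block == block[::-1]:
--                 return half - 1
--     for half in range(n // 2, 0, -1):
--         if list[n - 1 - half] == list[n - half]:
--             block = list[n - 2 * half:]
--             if block == block[::-1]:
--                 return n - 1 - half
--     return -1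
-- ===== Notes on version B (the rewrite author's own statement) =====
-- stated objective: alternative
-- what changed: Instead of expanding a two-pointer mirror outward around each of the n-1 split points, B searches directly for the boundary-anchored even palindrome: one pass over growing even prefixes (left-edge reflections) then one over shrinking even suffixes (right-edge reflections), each candidate first screened by comparing the two rows at its seam and then tested by whole-block reverse equality; it trades A's early-exit pairwise comparison for whole-block checks, so it can be slower when many seams match.
import Mathlib
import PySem

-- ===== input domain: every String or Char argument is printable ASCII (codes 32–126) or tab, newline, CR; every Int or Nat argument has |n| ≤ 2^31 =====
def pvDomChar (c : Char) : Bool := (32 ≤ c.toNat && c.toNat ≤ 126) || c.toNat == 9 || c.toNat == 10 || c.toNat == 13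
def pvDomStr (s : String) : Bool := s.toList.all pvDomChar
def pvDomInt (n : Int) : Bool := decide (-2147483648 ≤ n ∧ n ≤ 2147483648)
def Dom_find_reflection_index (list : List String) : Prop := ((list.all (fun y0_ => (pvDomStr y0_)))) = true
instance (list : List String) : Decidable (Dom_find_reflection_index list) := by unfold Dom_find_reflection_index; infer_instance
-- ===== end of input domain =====

-- B replaces A's per-split-point center-outward expansion by two edge-anchored passes over
-- palindrome half-lengths (growing even prefixes, then shrinking even suffixes), each candidate
-- screened by its seam pair and then tested by whole-block reverse equality: an alternative
-- decomposition (no speed claim; whole-block checks can cost more than A's early exits).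


-- ===== PORT A =====
-- the inner 'while(left >= 0 and right < len(list))' loop
def pvWhileA (xs : List String) (left right : Int) : Bool :=
  if _h : 0 ≤ left ∧ right < (xs.length : Int) then
    if PySem.List.pyGet? xs left = PySem.List.pyGet? xs right then
      pvWhileA xs (left - 1) (right + 1)
    else false
  else true
termination_by ((xs.length : Int) - right).toNat
decreasing_by omega

-- the outer 'for i in range(0, len(list) - 1)' loop with early return
def pvOuterA (xs : List String) : List Int → Int
  | [] => -1
  | i :: rest => if pvWhileA xs i (i + 1) then i else pvOuterA xs rest

def find_reflection_index (list : List String) : Int :=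
  pvOuterA list (PySem.List.pyRange 0 ((list.length : Int) - 1) 1)

-- ===== PORT B =====
-- 'for half in range(1, n // 2 + 1): if list[half-1] == list[half]: block = list[:2*half]; if block == block[::-1]: return half - 1'
-- (block[::-1] ported as block.reverse, cf. PySem.List.slice?_none_none_neg_one)
def pvLoop1B (xs : List String) : List Int → Option Int
  | [] => none
  | half :: rest =>
      if PySem.List.pyGet? xs (half - 1) = PySem.List.pyGet? xs half then
        let block := PySem.List.slice xs none (some (2 * half))
        if block = block.reverse then some (half - 1) else pvLoop1B xs rest
      else pvLoop1B xs rest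

-- 'for half in range(n // 2, 0, -1): if list[n-1-half] == list[n-half]: block = list[n - 2*half:]; if block == block[::-1]: return n - 1 - half'
def pvLoop2B (xs : List String) (n : Int) : List Int → Option Int
  | [] => none
  | half :: rest =>
      if PySem.List.pyGet? xs (n - 1 - half) = PySem.List.pyGet? xs (n - half) then
        let block := PySem.List.slice xs (some (n - 2 * half)) none
        if block = block.reverse then some (n - 1 - half) else pvLoop2B xs n rest
      else pvLoop2B xs n rest

def find_reflection_index_alt (list : List String) : Int :=
  let n : Int := list.length
  match pvLoop1B list (PySem.List.pyRange 1 (PySem.Int.floordiv n 2 + 1) 1) with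
  | some r => r
  | none =>
    match pvLoop2B list n (PySem.List.pyRange (PySem.Int.floordiv n 2) 0 (-1)) with
    | some r => r
    | none => -1

-- ===== PRECONDITION & SPEC =====
def Spec_find_reflection_index (list : List String) (out : Int) : Prop := out = find_reflection_index_alt list
instance (list : List String) (out : Int) : Decidable (Spec_find_reflection_index list out) := by unfold Spec_find_reflection_index; infer_instance

-- ===== CLAIM (what is proved, stated in full; the proofs are below) =====
def Claim_equal_find_reflection_index : Prop := ∀ (list : List String), Dom_find_reflection_index list → Spec_find_reflection_index list (find_reflection_index list)

-- ===== LEMMAS AND PROOFS =====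

-- A's two-pointer expansion equals the zip-of-reversed-prefix-and-suffix check.
theorem pvWhileA_eq_zip (xs : List String) (l r : Int) :
    l < r →
    pvWhileA xs l r =
      (((xs.take (l + 1).toNat).reverse).zip (xs.drop r.toNat)).all (fun p => p.1 == p.2) := by
  fun_induction pvWhileA xs l r with
  | case1 l r h heq ih =>
    intro hlr
    obtain ⟨hl, hrn⟩ := h
    have hr : 0 ≤ r := by omega
    have hln : l.toNat < xs.length := by omega
    have hrn' : r.toNat < xs.length := by omega
    rw [PySem.List.pyGet?_eq_some_getElem xs hl (by omega),
        PySem.List.pyGet?_eq_some_getElem xs hr (by omega)] at heq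
    have hx : xs[l.toNat] = xs[r.toNat] := by exact Option.some.inj heq
    have htake : (l + 1).toNat = l.toNat + 1 := by omega
    rw [htake, List.take_add_one, List.getElem?_eq_getElem hln,
        List.drop_eq_getElem_cons hrn']
    simp only [Option.toList, List.reverse_append, List.reverse_cons, List.reverse_nil,
      List.nil_append, List.cons_append, List.zip_cons_cons, List.all_cons]
    have ihh := ih (by omega)
    have h1 : (l - 1 + 1).toNat = l.toNat := by omega
    have h2 : (r + 1).toNat = r.toNat + 1 := by omega
    rw [h1, h2] at ihh
    simp [ihh, hx]
  | case2 l r h hne =>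
    intro hlr
    obtain ⟨hl, hrn⟩ := h
    have hr : 0 ≤ r := by omega
    have hln : l.toNat < xs.length := by omega
    have hrn' : r.toNat < xs.length := by omega
    rw [PySem.List.pyGet?_eq_some_getElem xs hl (by omega),
        PySem.List.pyGet?_eq_some_getElem xs hr (by omega)] at hne
    have hx : xs[l.toNat] ≠ xs[r.toNat] := fun e => hne (by rw [e])
    have htake : (l + 1).toNat = l.toNat + 1 := by omega
    rw [htake, List.take_add_one, List.getElem?_eq_getElem hln,
        List.drop_eq_getElem_cons hrn']
    simp only [Option.toList, List.reverse_append, List.reverse_cons, List.reverse_nil,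
      List.nil_append, List.cons_append, List.zip_cons_cons, List.all_cons]
    simp [hx]
  | case3 l r h =>
    intro hlr
    rcases not_and_or.mp h with hl | hrn
    · have : (l + 1).toNat = 0 := by omega
      simp [this]
    · have hr : 0 ≤ r := by omega
      have : xs.length ≤ r.toNat := by omega
      rw [List.drop_eq_nil_of_le this]
      simp

-- zip all-equal on lists of equal length is list equality
theorem pvZipAllEq {α : Type} [DecidableEq α] (a b : List α) (h : a.length = b.length) :
    ((a.zip b).all (fun p => p.1 == p.2)) = (a = b : Bool) := by
  induction a generalizing b with
  | nil => cases b <;> simp_all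
  | cons x t ih =>
    cases b with
    | nil => simp_all
    | cons y u =>
      simp only [List.zip_cons_cons, List.all_cons]
      have := ih u (by simpa using h)
      by_cases hxy : x = y <;> simp_all

-- an even-length block is a palindrome iff its reversed first half equals its second half
theorem pvPalHalf {α : Type} [DecidableEq α] (b : List α) (h : Nat) (hl : b.length = 2 * h) :
    (b = b.reverse) ↔ ((b.take h).reverse = b.drop h) := by
  have hb : b = b.take h ++ b.drop h := (List.take_append_drop h b).symm
  have hlu : (b.take h).length = h := by simp; omega
  have hlv : (b.drop h).length = h := by simp; omega
  constructor
  · intro hp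
    have : b.take h ++ b.drop h = (b.drop h).reverse ++ (b.take h).reverse := by
      rw [← List.reverse_append, ← hb, ← hp]
    have := List.append_inj this (by simp [hlu, hlv])
    rw [this.1]; simp
  · intro hh
    have hb2 : b = b.take h ++ (b.take h).reverse := by rw [hh]; exact hb
    conv_lhs => rw [hb2]
    conv_rhs => rw [hb2]
    rw [List.reverse_append, List.reverse_reverse]

-- find? congruence on members
theorem pvFindCongr {α : Type} (p q : α → Bool) (l : List α) (h : ∀ x ∈ l, p x = q x) :
    l.find? p = l.find? q := by
  induction l with
  | nil => rfl
  | cons x t ih =>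
    simp only [List.find?_cons, h x (List.mem_cons_self ..)]
    cases q x <;> simp [ih fun y hy => h y (List.mem_cons_of_mem _ hy)]

-- skipping a duplicate element in a find? scan
theorem pvFindDedup {α : Type} (p : α → Bool) (l1 t : List α) (x : α) (hx : x ∈ l1) :
    (l1 ++ x :: t).find? p = (l1 ++ t).find? p := by
  rw [List.find?_append, List.find?_append]
  cases h : l1.find? p with
  | some v => rfl
  | none =>
    have : p x = false := by
      have := List.find?_eq_none.mp h x hx
      simpa using this
    simp [this]

-- A's check at i, prefix form: for 2*(i+1) ≤ n it is the even-prefix palindrome test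
theorem pvCheckPrefix (xs : List String) (i : Nat) (h : 2 * (i + 1) ≤ xs.length) :
    pvWhileA xs i (i + 1) =
      (PySem.List.slice xs none (some (2 * ((i : Int) + 1))) =
       (PySem.List.slice xs none (some (2 * ((i : Int) + 1)))).reverse : Bool) := by
  have h2 : ((2 : Int) * ((i : Int) + 1)) = ((2 * (i + 1) : Nat) : Int) := by push_cast; ring
  rw [h2, PySem.List.slice_to_natCast]
  set b := xs.take (2 * (i + 1)) with hb
  have hbl : b.length = 2 * (i + 1) := by simp [hb]; omega
  have hiff := pvPalHalf b (i + 1) hbl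
  have hwz := pvWhileA_eq_zip xs i (i + 1) (by omega)
  have e1 : ((i : Int) + 1).toNat = i + 1 := by omega
  have e2 : ((i : Int)).toNat = i := by omega
  rw [hwz, e1]
  -- identify the zipped lists with b's halves
  have htk : b.take (i + 1) = xs.take (i + 1) := by
    rw [hb, List.take_take]; congr 1; omega
  have hdr : b.drop (i + 1) = (xs.drop (i + 1)).take (i + 1) := by
    rw [hb, List.drop_take]; congr 1; omega
  have hlen1 : (xs.take (i + 1)).reverse.length = i + 1 := by simp; omega
  have hlen2 : i + 1 ≤ (xs.drop (i + 1)).length := by simp; omega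
  -- zip truncates the longer right list
  have hz : ((xs.take (i + 1)).reverse).zip (xs.drop (i + 1)) =
      ((xs.take (i + 1)).reverse).zip ((xs.drop (i + 1)).take (i + 1)) := by
    rw [List.zip_eq_zip_take_min,
      show min ((xs.take (i + 1)).reverse.length) ((xs.drop (i + 1)).length) = i + 1 by
        simp; omega,
      List.take_of_length_le (le_of_eq hlen1)]
  rw [hz, pvZipAllEq _ _ (by simp; omega)]
  rw [← htk, ← hdr]
  exact decide_eq_decide.mpr hiff.symm

-- A's check at i, suffix form: for n ≤ 2*(i+1), i ≤ n-2 it is the even-suffix palindrome test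
theorem pvCheckSuffix (xs : List String) (i : Nat) (hn : xs.length ≤ 2 * (i + 1))
    (hi : i + 2 ≤ xs.length) :
    pvWhileA xs i (i + 1) =
      (PySem.List.slice xs (some ((xs.length : Int) - 2 * ((xs.length : Int) - 1 - i))) none =
       (PySem.List.slice xs (some ((xs.length : Int) - 2 * ((xs.length : Int) - 1 - i))) none).reverse : Bool) := by
  set n := xs.length with hnn
  have h2 : ((n : Int) - 2 * ((n : Int) - 1 - i)) = ((2 * (i + 1) - n : Nat) : Int) := by
    omega
  rw [h2, PySem.List.slice_from_natCast]
  set s := xs.drop (2 * (i + 1) - n) with hs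
  set h := n - 1 - i with hh
  have hsl : s.length = 2 * h := by simp [hs, hnn]; omega
  have hiff := pvPalHalf s h hsl
  have hwz := pvWhileA_eq_zip xs i (i + 1) (by omega)
  have e1 : ((i : Int) + 1).toNat = i + 1 := by omega
  rw [hwz, e1]
  -- the left list (length i+1) is truncated by zip to length h
  have hlen1 : (xs.take (i + 1)).reverse.length = i + 1 := by simp [← hnn]; omega
  have hlen2 : (xs.drop (i + 1)).length = h := by simp [← hnn]; omega
  have hz : ((xs.take (i + 1)).reverse).zip (xs.drop (i + 1)) =
      (((xs.take (i + 1)).reverse).take h).zip (xs.drop (i + 1)) := by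
    rw [List.zip_eq_zip_take_min,
      show min ((xs.take (i + 1)).reverse.length) ((xs.drop (i + 1)).length) = h by
        simp [← hnn]; omega,
      List.take_of_length_le (le_of_eq hlen2)]
  rw [hz, pvZipAllEq _ _ (by simp [← hnn]; omega)]
  -- identify with s's halves
  have htk : ((xs.take (i + 1)).reverse).take h = (s.take h).reverse := by
    rw [List.take_reverse,
      show (xs.take (i + 1)).length - h = 2 * (i + 1) - n by simp [← hnn]; omega,
      List.drop_take, hs]
    congr 2
    omega
  have hdr : xs.drop (i + 1) = s.drop h := by
    rw [hs, List.drop_drop]; congr 1; omega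
  rw [htk, hdr]
  exact decide_eq_decide.mpr hiff.symm

-- loop rewrites as find?
theorem pvOuterA_eq_find (xs : List String) (l : List Int) :
    pvOuterA xs l = ((l.find? (fun i => pvWhileA xs i (i + 1))).getD (-1)) := by
  induction l with
  | nil => rfl
  | cons i t ih =>
    simp only [pvOuterA, List.find?_cons]
    cases h : pvWhileA xs i (i + 1) <;> simp [ih]

theorem pvLoop1B_eq_find (xs : List String) (l : List Int) :
    pvLoop1B xs l =
      (l.find? (fun half =>
        decide (PySem.List.pyGet? xs (half - 1) = PySem.List.pyGet? xs half) &&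
        decide (PySem.List.slice xs none (some (2 * half)) =
          (PySem.List.slice xs none (some (2 * half))).reverse))).map (fun half => half - 1) := by
  induction l with
  | nil => rfl
  | cons x t ih =>
    simp only [pvLoop1B, List.find?_cons]
    by_cases hg : PySem.List.pyGet? xs (x - 1) = PySem.List.pyGet? xs x
    · rw [if_pos hg]
      by_cases hc : PySem.List.slice xs none (some (2 * x)) =
          (PySem.List.slice xs none (some (2 * x))).reverse
      · rw [if_pos hc]; simp [decide_eq_true hg, decide_eq_true hc]
      · rw [if_neg hc]; simp [decide_eq_false hc, ih]
    · rw [if_neg hg]; simp [decide_eq_false hg, ih]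

theorem pvLoop2B_eq_find (xs : List String) (n : Int) (l : List Int) :
    pvLoop2B xs n l =
      (l.find? (fun half =>
        decide (PySem.List.pyGet? xs (n - 1 - half) = PySem.List.pyGet? xs (n - half)) &&
        decide (PySem.List.slice xs (some (n - 2 * half)) none =
          (PySem.List.slice xs (some (n - 2 * half)) none).reverse))).map (fun half => n - 1 - half) := by
  induction l with
  | nil => rfl
  | cons x t ih =>
    simp only [pvLoop2B, List.find?_cons]
    by_cases hg : PySem.List.pyGet? xs (n - 1 - x) = PySem.List.pyGet? xs (n - x)
    · rw [if_pos hg]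
      by_cases hc : PySem.List.slice xs (some (n - 2 * x)) none =
          (PySem.List.slice xs (some (n - 2 * x)) none).reverse
      · rw [if_pos hc]; simp [decide_eq_true hg, decide_eq_true hc]
      · rw [if_neg hc]; simp [decide_eq_false hc, ih]
    · rw [if_neg hg]; simp [decide_eq_false hg, ih]

-- an even palindrome's two seam elements are equal
theorem pvPalSeam {α : Type} (b : List α) (h : Nat) (h1 : 1 ≤ h) (hl : b.length = 2 * h)
    (hp : b = b.reverse) : b[h]? = b[h - 1]? := by
  calc b[h]? = b.reverse[h]? := by rw [← hp]
    _ = b[b.length - 1 - h]? := List.getElem?_reverse (by omega)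
    _ = b[h - 1]? := by rw [show b.length - 1 - h = h - 1 by omega]

-- a palindromic even prefix forces its seam rows equal
theorem pvSeamPrefix (xs : List String) (k : Nat) (h : 2 * (k + 1) ≤ xs.length)
    (hp : PySem.List.slice xs none (some (2 * ((k : Int) + 1))) =
      (PySem.List.slice xs none (some (2 * ((k : Int) + 1)))).reverse) :
    PySem.List.pyGet? xs ((k : Int) + 1 - 1) = PySem.List.pyGet? xs ((k : Int) + 1) := by
  have h2 : ((2 : Int) * ((k : Int) + 1)) = ((2 * (k + 1) : Nat) : Int) := by push_cast; ring
  rw [h2, PySem.List.slice_to_natCast] at hp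
  have hseam := pvPalSeam (xs.take (2 * (k + 1))) (k + 1) (by omega) (by simp; omega) hp
  rw [List.getElem?_take_of_lt (by omega), List.getElem?_take_of_lt (by omega)] at hseam
  rw [show (k : Int) + 1 - 1 = ((k : Nat) : Int) by ring,
    show (k : Int) + 1 = ((k + 1 : Nat) : Int) by push_cast; ring,
    PySem.List.pyGet?_natCast, PySem.List.pyGet?_natCast]
  simpa using hseam.symm

-- a palindromic even suffix forces its seam rows equal
theorem pvSeamSuffix (xs : List String) (i : Nat) (hn : xs.length ≤ 2 * (i + 1))
    (hi : i + 2 ≤ xs.length)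
    (hp : PySem.List.slice xs (some ((xs.length : Int) - 2 * ((xs.length : Int) - 1 - i))) none =
      (PySem.List.slice xs (some ((xs.length : Int) - 2 * ((xs.length : Int) - 1 - i))) none).reverse) :
    PySem.List.pyGet? xs ((i : Int)) = PySem.List.pyGet? xs ((i : Int) + 1) := by
  set n := xs.length with hnn
  have h2 : ((n : Int) - 2 * ((n : Int) - 1 - i)) = ((2 * (i + 1) - n : Nat) : Int) := by omega
  rw [h2, PySem.List.slice_from_natCast] at hp
  have hseam := pvPalSeam (xs.drop (2 * (i + 1) - n)) (n - 1 - i) (by omega)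
    (by simp [← hnn]; omega) hp
  rw [List.getElem?_drop, List.getElem?_drop] at hseam
  rw [show 2 * (i + 1) - n + (n - 1 - i) = i + 1 by omega,
    show 2 * (i + 1) - n + (n - 1 - i - 1) = i by omega] at hseam
  rw [show (i : Int) + 1 = ((i + 1 : Nat) : Int) by push_cast; ring,
    PySem.List.pyGet?_natCast, PySem.List.pyGet?_natCast]
  exact hseam.symm

-- match-on-two-options as (o1.or o2).getD (-1)
theorem pvMatchOr (o1 o2 : Option Int) :
    (match o1 with
     | some r => r
     | none => match o2 with | some r => r | none => (-1 : Int)) = (o1.or o2).getD (-1) := by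
  cases o1 <;> cases o2 <;> rfl

-- ===== VERDICT (by name: the statement is the Claim_ definition above) =====
theorem find_reflection_index_spec : Claim_equal_find_reflection_index := by
  intro xs _
  unfold Spec_find_reflection_index find_reflection_index find_reflection_index_alt
  simp only []
  by_cases hsmall : xs.length ≤ 1
  · have hfd : PySem.Int.floordiv (xs.length : Int) 2 = ((xs.length / 2 : Nat) : Int) := by
      exact_mod_cast PySem.Int.floordiv_natCast xs.length 2
    have hz : xs.length / 2 = 0 := by omega
    rw [hfd, hz]
    rw [PySem.List.pyRange_one_eq_nil (a := 0) (by omega),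
        PySem.List.pyRange_one_eq_nil (a := 1) (by simp),
        PySem.List.pyRange_neg_one_eq_nil (by simp)]
    rfl
  · replace hsmall : 1 < xs.length := by omega
    set N := xs.length with hN
    set m := N / 2 with hm
    have hm1 : 1 ≤ m := by omega
    have hfd : PySem.Int.floordiv (N : Int) 2 = (m : Int) := by
      exact_mod_cast PySem.Int.floordiv_natCast N 2
    rw [hfd, pvOuterA_eq_find, pvLoop1B_eq_find, pvLoop2B_eq_find, pvMatchOr]
    -- loop 1: find? over i = half - 1 ∈ [0, m)
    have hl1 : PySem.List.pyRange 1 ((m : Int) + 1) 1 =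
        (PySem.List.pyRange 0 (m : Int) 1).map (fun i => i + 1) := by
      rw [PySem.List.pyRange_one, PySem.List.pyRange_one, List.map_map]
      rw [show ((m : Int) + 1 - 1).toNat = m by omega, show ((m : Int) - 0).toNat = m by omega]
      apply List.map_congr_left
      intro k _
      simp; ring
    rw [hl1, List.find?_map, Option.map_map]
    rw [show ((fun half => half - 1) ∘ fun i => i + (1 : Int)) = id by funext i; simp,
        Option.map_id]
    have hc1 : (PySem.List.pyRange 0 (m : Int) 1).find?
          ((fun half =>
            decide (PySem.List.pyGet? xs (half - 1) = PySem.List.pyGet? xs half) &&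
            decide (PySem.List.slice xs none (some (2 * half)) =
              (PySem.List.slice xs none (some (2 * half))).reverse)) ∘ fun i => i + 1) =
        (PySem.List.pyRange 0 (m : Int) 1).find? (fun i => pvWhileA xs i (i + 1)) := by
      apply pvFindCongr
      intro i hi
      obtain ⟨hi0, him⟩ := PySem.List.mem_pyRange_one.mp hi
      obtain ⟨k, rfl⟩ : ∃ k : Nat, i = (k : Int) := ⟨i.toNat, (Int.toNat_of_nonneg hi0).symm⟩
      have hk : k < m := by exact_mod_cast him
      simp only [Function.comp]
      rw [pvCheckPrefix xs k (by omega)]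
      by_cases hp : PySem.List.slice xs none (some (2 * ((k : Int) + 1))) =
          (PySem.List.slice xs none (some (2 * ((k : Int) + 1)))).reverse
      · rw [decide_eq_true hp, decide_eq_true (pvSeamPrefix xs k (by omega) hp)]
        rfl
      · rw [decide_eq_false hp, Bool.and_false]
    rw [hc1]
    -- loop 2: find? over i = N - 1 - half, half ∈ [m, 1] descending
    rw [PySem.List.pyRange_neg_one]
    rw [show ((m : Int) - 0).toNat = m by omega]
    rw [List.find?_map, Option.map_map]
    have hg : ((fun half => (N : Int) - 1 - half) ∘ fun k : Nat => (m : Int) - (k : Int)) =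
        (fun k : Nat => ((N : Int) - 1 - (m : Int)) + (k : Int)) := by
      funext k; simp; ring
    rw [hg]
    have hl2 : PySem.List.pyRange ((N : Int) - 1 - (m : Int)) ((N : Int) - 1) 1 =
        (List.range m).map (fun k : Nat => ((N : Int) - 1 - (m : Int)) + (k : Int)) := by
      rw [PySem.List.pyRange_one,
        show ((N : Int) - 1 - ((N : Int) - 1 - (m : Int))).toNat = m by omega]
    have hc2 : (List.range m).find?
          ((fun half =>
            decide (PySem.List.pyGet? xs ((N : Int) - 1 - half) = PySem.List.pyGet? xs ((N : Int) - half)) &&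
            decide (PySem.List.slice xs (some ((N : Int) - 2 * half)) none =
              (PySem.List.slice xs (some ((N : Int) - 2 * half)) none).reverse)) ∘
            fun k : Nat => (m : Int) - (k : Int)) =
        (List.range m).find?
          ((fun i => pvWhileA xs i (i + 1)) ∘ fun k : Nat => ((N : Int) - 1 - (m : Int)) + (k : Int)) := by
      apply pvFindCongr
      intro k hk
      have hkm : k < m := List.mem_range.mp hk
      simp only [Function.comp]
      have hj : ((N - 1 - m + k : Nat) : Int) = (N : Int) - 1 - (m : Int) + (k : Int) := by
        push_cast; omega
      have hchk := pvCheckSuffix xs (N - 1 - m + k) (by omega) (by omega)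
      rw [hj, ← hN] at hchk
      rw [show (N : Int) - 2 * ((m : Int) - (k : Int)) =
          (N : Int) - 2 * ((N : Int) - 1 - ((N : Int) - 1 - (m : Int) + (k : Int))) by ring,
        hchk]
      by_cases hp : PySem.List.slice xs
          (some ((N : Int) - 2 * ((N : Int) - 1 - ((N : Int) - 1 - (m : Int) + (k : Int))))) none =
          (PySem.List.slice xs
            (some ((N : Int) - 2 * ((N : Int) - 1 - ((N : Int) - 1 - (m : Int) + (k : Int))))) none).reverse
      · have hgd := pvSeamSuffix xs (N - 1 - m + k) (by omega) (by omega) (by rw [hj, ← hN]; exact hp)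
        rw [hj] at hgd
        rw [decide_eq_true hp,
          show (N : Int) - 1 - ((m : Int) - (k : Int)) = (N : Int) - 1 - (m : Int) + (k : Int) by ring,
          show (N : Int) - ((m : Int) - (k : Int)) = (N : Int) - 1 - (m : Int) + (k : Int) + 1 by ring,
          decide_eq_true hgd]
        rfl
      · rw [decide_eq_false hp, Bool.and_false]
    rw [hc2, ← List.find?_map, ← hl2]
    -- combine the two scans into one and compare with A's single scan
    simp only [id_eq]
    rw [← List.find?_append]
    have hsplitA : PySem.List.pyRange 0 ((N : Int) - 1) 1 =
        PySem.List.pyRange 0 (m : Int) 1 ++ PySem.List.pyRange (m : Int) ((N : Int) - 1) 1 :=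
      PySem.List.pyRange_one_append 0 (m : Int) ((N : Int) - 1) (by omega) (by omega)
    rw [hsplitA]
    congr 1
    by_cases hpar : N = 2 * m
    · -- N even: B's second list starts with the duplicate index m - 1 ∈ first list
      have hstep : PySem.List.pyRange ((N : Int) - 1 - (m : Int)) ((N : Int) - 1) 1 =
          ((m : Int) - 1) :: PySem.List.pyRange (m : Int) ((N : Int) - 1) 1 := by
        rw [show (N : Int) - 1 - (m : Int) = (m : Int) - 1 by omega,
          PySem.List.pyRange_one_cons (by omega),
          show (m : Int) - 1 + 1 = (m : Int) by ring]
      rw [hstep]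
      exact (pvFindDedup _ _ _ _ (PySem.List.mem_pyRange_one.mpr ⟨by omega, by omega⟩)).symm
    · -- N odd: the lists agree outright
      rw [show (N : Int) - 1 - (m : Int) = (m : Int) by omega]
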